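-- pv_equiv track=rewrite | github.com/chakraborty69178/DSAD-assignments | Mobile Manufacturing/Mobile Manufacturing Optimization.py | totalTime1
-- ===== SOURCE A (Python) =====
-- def totalTime1(timeMappings , order):
--     timeMan =0
--     timeAss =0
--     idleTime =0
--     timeManStart =[]
--     timeAssStart =[]
--     for i in order:
--         timeManStart.append(timeMan)
--         timeMan += int(timeMappings[i]['man'])
--         if timeMan>=timeAss:
--             currIdle = timeMan - timeAss
--             idleTime += currIdle
--             timeAssStart.append(timeAss+currIdle)
--             timeAss += (currIdle+ int(timeMappings[i]['ass']))
--         else: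
--             timeAssStart.append(timeAss)
--             timeAss += timeMappings[i]['ass']
--
--     totalTime = 0
--     if timeMan>timeAss:
--         totalTime = timeMan
--     else:
--         totalTime = timeAss
--     return totalTime,idleTime,timeManStart,timeAssStart
-- ===== SOURCE B (Python) =====
-- def totalTime1(timeMappings, order):
--     # Closed-form: assembly start_i = assPrefix[i] + best_i, where best_i is the
--     # running maximum (floored at 0) of manPrefix[j+1] - assPrefix[j]; the idle
--     # time is the final running maximum itself.
--     mans = [int(timeMappings[i]['man']) for i in order]
--     asses = [int(timeMappings[i]['ass']) for i in order]
--     accM = 0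
--     M = [0]
--     for m in mans:
--         accM += m
--         M.append(accM)
--     accA = 0
--     A = [0]
--     for a in asses:
--         accA += a
--         A.append(accA)
--     best = 0
--     timeAssStart = []
--     for mp1, ap in zip(M[1:], A):
--         best = max(best, mp1 - ap)
--         timeAssStart.append(ap + best)
--     return max(accM, accA + best), best, M[:-1], timeAssStart
-- ===== Notes on version B (the rewrite author's own statement) =====
-- stated objective: alternative
-- what changed: Replaces A's stateful pipeline simulation (threading the assembler-free time and accumulating idle gaps job by job) with a closed-form computation: prefix sums of man and ass times, each assembly start is assPrefix[i] plus a running maximum of (manPrefix[j+1] - assPrefix[j]) floored at 0, and the idle time is that final maximum itself, never accumulated.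
import Mathlib
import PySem

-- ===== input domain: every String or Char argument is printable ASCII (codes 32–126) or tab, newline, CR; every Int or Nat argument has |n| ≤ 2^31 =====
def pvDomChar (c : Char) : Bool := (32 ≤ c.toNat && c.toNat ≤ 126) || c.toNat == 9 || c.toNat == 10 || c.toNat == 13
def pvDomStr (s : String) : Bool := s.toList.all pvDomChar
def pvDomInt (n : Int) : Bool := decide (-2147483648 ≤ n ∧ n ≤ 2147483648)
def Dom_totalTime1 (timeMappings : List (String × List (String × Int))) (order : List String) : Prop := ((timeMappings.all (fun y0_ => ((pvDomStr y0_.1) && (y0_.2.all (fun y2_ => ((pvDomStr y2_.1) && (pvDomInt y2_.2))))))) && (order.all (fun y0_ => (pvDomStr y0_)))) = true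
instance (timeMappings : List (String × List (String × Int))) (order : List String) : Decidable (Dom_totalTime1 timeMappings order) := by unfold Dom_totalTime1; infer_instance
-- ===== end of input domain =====

-- B replaces A's stateful pipeline simulation with a closed form: prefix sums of
-- man and ass times plus a running maximum of (manPrefix − assPrefix); the idle
-- time is that final maximum itself.  Objective: alternative; neither mutates
-- its arguments.

-- Python dict indexing on the association-list encoding (shared semantics helper).
def pvFind {ν : Type} (d : List (String × ν)) (k : String) : Option ν :=
  (PySem.Dict.mk d).get? k

def pvMan (tm : List (String × List (String × Int))) (i : String) : Int :=
  ((pvFind ((pvFind tm i).getD []) "man").getD 0)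

def pvAss (tm : List (String × List (String × Int))) (i : String) : Int :=
  ((pvFind ((pvFind tm i).getD []) "ass").getD 0)

-- ===== PORT A =====
def totalTime1 (timeMappings : List (String × List (String × Int))) (order : List String) : Int × Int × List Int × List Int :=
  let s := order.foldl (fun (s : Int × Int × Int × List Int × List Int) i =>
    let timeMan := s.1
    let timeAss := s.2.1
    let idleTime := s.2.2.1
    let timeManStart := s.2.2.2.1 ++ [timeMan]
    let timeMan := timeMan + pvMan timeMappings i
    if timeMan ≥ timeAss then
      let currIdle := timeMan - timeAss
      (timeMan, timeAss + (currIdle + pvAss timeMappings i), idleTime + currIdle,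
        timeManStart, s.2.2.2.2 ++ [timeAss + currIdle])
    else
      (timeMan, timeAss + pvAss timeMappings i, idleTime,
        timeManStart, s.2.2.2.2 ++ [timeAss]))
    (0, 0, 0, [], [])
  let totalTime := if s.1 > s.2.1 then s.1 else s.2.1
  (totalTime, s.2.2.1, s.2.2.2.1, s.2.2.2.2)

-- ===== PORT B =====
def totalTime1_alt (timeMappings : List (String × List (String × Int))) (order : List String) : Int × Int × List Int × List Int :=
  let mans := order.map (fun i => pvMan timeMappings i)
  let asses := order.map (fun i => pvAss timeMappings i)
  let pM := mans.foldl (fun (s : Int × List Int) m => (s.1 + m, s.2 ++ [s.1 + m])) (0, [(0 : Int)])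
  let M := pM.2
  let pA := asses.foldl (fun (s : Int × List Int) a => (s.1 + a, s.2 ++ [s.1 + a])) (0, [(0 : Int)])
  let A := pA.2
  -- zip(M[1:], A); M[:-1] is dropLast (exact: Python l[:-1] = all but the last element, [] on [])
  let q := ((M.drop 1).zip A).foldl
      (fun (s : Int × List Int) x =>
        let best := max s.1 (x.1 - x.2)
        (best, s.2 ++ [x.2 + best])) (0, [])
  (max pM.1 (pA.1 + q.1), q.1, M.dropLast, q.2)

-- ===== PRECONDITION & SPEC =====
-- Pre_ excludes exactly the inputs where Python A raises KeyError: some job in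
-- order is missing from timeMappings, or its record lacks a 'man' or 'ass' key.
def Pre_totalTime1 (timeMappings : List (String × List (String × Int))) (order : List String) : Prop :=
  ∀ i ∈ order, (pvFind timeMappings i).isSome = true ∧
    (pvFind ((pvFind timeMappings i).getD []) "man").isSome = true ∧
    (pvFind ((pvFind timeMappings i).getD []) "ass").isSome = true
instance (timeMappings : List (String × List (String × Int))) (order : List String) : Decidable (Pre_totalTime1 timeMappings order) := by unfold Pre_totalTime1; infer_instance

def pvWitness_totalTime1 : (List (String × List (String × Int))) × List String :=
  ([("a", [("man", 2), ("ass", 3)]), ("b", [("man", 1), ("ass", 4)])], ["a", "b", "a"])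

def Spec_totalTime1 (timeMappings : List (String × List (String × Int))) (order : List String) (out : Int × Int × List Int × List Int) : Prop := out = totalTime1_alt timeMappings order
instance (timeMappings : List (String × List (String × Int))) (order : List String) (out : Int × Int × List Int × List Int) : Decidable (Spec_totalTime1 timeMappings order out) := by unfold Spec_totalTime1; infer_instance

-- ===== CLAIM (what is proved, stated in full; the proofs are below) =====
def Claim_equal_totalTime1 : Prop := ∀ (timeMappings : List (String × List (String × Int))) (order : List String), Dom_totalTime1 timeMappings order → Pre_totalTime1 timeMappings order → Spec_totalTime1 timeMappings order (totalTime1 timeMappings order)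

-- ===== LEMMAS AND PROOFS =====

-- Recursive specification of A's loop:
-- pvRun tm l m a = (final man time, final ass time, idle added, man starts, ass starts).
def pvRun (tm : List (String × List (String × Int))) : List String → Int → Int → Int × Int × Int × List Int × List Int
  | [], m, a => (m, a, 0, [], [])
  | i :: rest, m, a =>
    let m' := m + pvMan tm i
    let start := max m' a
    let r := pvRun tm rest m' (start + pvAss tm i)
    (r.1, r.2.1, r.2.2.1 + (start - a), m :: r.2.2.2.1, start :: r.2.2.2.2)

theorem foldA_eq_pvRun (tm : List (String × List (String × Int))) (l : List String)
    (m a id : Int) (xs ys : List Int) :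
    l.foldl (fun (s : Int × Int × Int × List Int × List Int) i =>
      let timeMan := s.1
      let timeAss := s.2.1
      let idleTime := s.2.2.1
      let timeManStart := s.2.2.2.1 ++ [timeMan]
      let timeMan := timeMan + pvMan tm i
      if timeMan ≥ timeAss then
        let currIdle := timeMan - timeAss
        (timeMan, timeAss + (currIdle + pvAss tm i), idleTime + currIdle,
          timeManStart, s.2.2.2.2 ++ [timeAss + currIdle])
      else
        (timeMan, timeAss + pvAss tm i, idleTime,
          timeManStart, s.2.2.2.2 ++ [timeAss])) (m, a, id, xs, ys)
    = ((pvRun tm l m a).1, (pvRun tm l m a).2.1, id + (pvRun tm l m a).2.2.1,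
       xs ++ (pvRun tm l m a).2.2.2.1, ys ++ (pvRun tm l m a).2.2.2.2) := by
  induction l generalizing m a id xs ys with
  | nil => simp [pvRun]
  | cons i rest ih =>
    simp only [List.foldl_cons, pvRun]
    by_cases h : m + pvMan tm i ≥ a
    · have hmax : max (m + pvMan tm i) a = m + pvMan tm i := max_eq_left h
      have e1 : a + (m + pvMan tm i - a + pvAss tm i)
          = max (m + pvMan tm i) a + pvAss tm i := by rw [hmax]; ring
      have e2 : a + (m + pvMan tm i - a) = m + pvMan tm i := by ring
      rw [if_pos h, ih, e1, hmax]
      refine Prod.ext rfl (Prod.ext rfl (Prod.ext (by ring) (Prod.ext (by simp) (by rw [e2]; simp))))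
    · have hmax : max (m + pvMan tm i) a = a := max_eq_right (by omega)
      rw [if_neg h, ih, hmax]
      refine Prod.ext rfl (Prod.ext rfl (Prod.ext (by ring) (Prod.ext (by simp) (by simp))))

-- Scan shape of B's two prefix-sum loops.
def pvScan (c : Int) : List Int → List Int
  | [] => []
  | x :: r => (c + x) :: pvScan (c + x) r

theorem foldScan_eq (ms : List Int) (c : Int) (xs : List Int) :
    ms.foldl (fun (s : Int × List Int) m => (s.1 + m, s.2 ++ [s.1 + m])) (c, xs)
    = (c + ms.sum, xs ++ pvScan c ms) := by
  induction ms generalizing c xs with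
  | nil => simp [pvScan]
  | cons x r ih =>
    simp only [List.foldl_cons, pvScan, ih]
    refine Prod.ext (by simp [add_assoc]) (by simp)

-- The zipped timeline B folds over, stated recursively.
def pvZipB (tm : List (String × List (String × Int))) : List String → Int → Int → List (Int × Int)
  | [], _, _ => []
  | i :: rest, m, α => (m + pvMan tm i, α) :: pvZipB tm rest (m + pvMan tm i) (α + pvAss tm i)

theorem scan_zip_eq (tm : List (String × List (String × Int))) (l : List String) (m α : Int) :
    (pvScan m (l.map (fun i => pvMan tm i))).zip (α :: pvScan α (l.map (fun i => pvAss tm i)))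
    = pvZipB tm l m α := by
  induction l generalizing m α with
  | nil => simp [pvScan, pvZipB]
  | cons i rest ih => simp only [List.map_cons, pvScan, pvZipB, List.zip_cons_cons, ih]

-- B's running-max loop, stated recursively.
def pvBrec (tm : List (String × List (String × Int))) : List String → Int → Int → Int → Int × List Int
  | [], _, _, b => (b, [])
  | i :: rest, m, α, b =>
    let b' := max b (m + pvMan tm i - α)
    let r := pvBrec tm rest (m + pvMan tm i) (α + pvAss tm i) b'
    (r.1, (α + b') :: r.2)

theorem foldB_eq_pvBrec (tm : List (String × List (String × Int))) (l : List String)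
    (m α b : Int) (ys : List Int) :
    (pvZipB tm l m α).foldl
      (fun (s : Int × List Int) x =>
        let best := max s.1 (x.1 - x.2)
        (best, s.2 ++ [x.2 + best])) (b, ys)
    = ((pvBrec tm l m α b).1, ys ++ (pvBrec tm l m α b).2) := by
  induction l generalizing m α b ys with
  | nil => simp [pvZipB, pvBrec]
  | cons i rest ih => simp only [pvZipB, pvBrec, List.foldl_cons, ih]; simp

-- Man-start prefixes, shared by both characterisations.
def pvManS (tm : List (String × List (String × Int))) : List String → Int → List Int
  | [], _ => []
  | i :: rest, m => m :: pvManS tm rest (m + pvMan tm i)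

theorem scan_dropLast (tm : List (String × List (String × Int))) (l : List String) (m : Int) :
    (m :: pvScan m (l.map (fun i => pvMan tm i))).dropLast = pvManS tm l m := by
  induction l generalizing m with
  | nil => simp [pvScan, pvManS]
  | cons i rest ih => simp only [List.map_cons, pvScan, pvManS, List.dropLast_cons₂, ih]

-- Main bridge: A's simulation equals B's closed form, with timeAss = α + b.
theorem pvRun_eq_closed (tm : List (String × List (String × Int))) (l : List String)
    (m α b : Int) :
    pvRun tm l m (α + b)
    = (m + (l.map (fun i => pvMan tm i)).sum,
       (α + (l.map (fun i => pvAss tm i)).sum + (pvBrec tm l m α b).1,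
        (pvBrec tm l m α b).1 - b,
        pvManS tm l m,
        (pvBrec tm l m α b).2)) := by
  induction l generalizing m α b with
  | nil => simp [pvRun, pvBrec, pvManS]
  | cons i rest ih =>
    simp only [pvRun, pvBrec, pvManS, List.map_cons, List.sum_cons]
    have hmax : max (m + pvMan tm i) (α + b) = α + max b (m + pvMan tm i - α) := by
      rw [max_comm b]; rw [← max_add_add_left]; congr 1; ring
    have harg : max (m + pvMan tm i) (α + b) + pvAss tm i
        = (α + pvAss tm i) + max b (m + pvMan tm i - α) := by rw [hmax]; ring
    rw [harg, ih]
    refine Prod.ext (by ring) (Prod.ext (by ring) (Prod.ext (by rw [hmax]; ring)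
      (Prod.ext rfl (by rw [hmax]))))

-- ===== VERDICT (by name: the statement is the Claim_ definition above) =====
theorem totalTime1_spec : Claim_equal_totalTime1 := by
  intro tm order _ _
  unfold Spec_totalTime1 totalTime1 totalTime1_alt
  simp only [foldA_eq_pvRun, foldScan_eq, List.nil_append, zero_add]
  have h0 : (0 : Int) = 0 + 0 := by ring
  rw [show (pvRun tm order 0 0) = pvRun tm order 0 (0 + 0) by rw [← h0],
      pvRun_eq_closed tm order 0 0 0]
  have hz : ((0 : Int) :: pvScan 0 (order.map (fun i => pvMan tm i))).drop 1
      = pvScan 0 (order.map (fun i => pvMan tm i)) := by simp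
  simp only [List.singleton_append]
  rw [hz, scan_zip_eq, foldB_eq_pvBrec, scan_dropLast]
  simp only [List.nil_append, sub_zero, zero_add]
  refine Prod.ext ?_ (Prod.ext rfl (Prod.ext rfl rfl))
  · split_ifs with h <;> omega
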